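-- pv_equiv track=rewrite | github.com/lllverb/pythonstudy | cutting.py | getNewLabel
-- ===== SOURCE A (Python) =====
-- def getNewLabel(label):
--     newlabel = ""
--     for s in label:
--         # アスキーコードに変換
--         s = ord(s)
--         if 65 <= s and s <= 90:
--             s = s + 1
--         elif 97 <= s and s <= 122:
--             s = s + 1
--         # アスキーコードから文字を取得
--         s = chr(s)
--         newlabel += s
--     return newlabel
-- ===== SOURCE B (Python) =====
-- def getNewLabel(label):
--     letters = "ABCDEFGHIJKLMNOPQRSTUVWXYZabcdefghijklmnopqrstuvwxyz"
--     table = str.maketrans({c: chr(ord(c) + 1) for c in letters})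
--     return label.translate(table)
-- ===== Notes on version B (the rewrite author's own statement) =====
-- stated objective: idiomatic
-- what changed: Replaced the explicit per-character loop with its ord/chr conversions and two range branches by building a 52-entry translation table once (str.maketrans) and doing a single label.translate call.
import Mathlib
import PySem

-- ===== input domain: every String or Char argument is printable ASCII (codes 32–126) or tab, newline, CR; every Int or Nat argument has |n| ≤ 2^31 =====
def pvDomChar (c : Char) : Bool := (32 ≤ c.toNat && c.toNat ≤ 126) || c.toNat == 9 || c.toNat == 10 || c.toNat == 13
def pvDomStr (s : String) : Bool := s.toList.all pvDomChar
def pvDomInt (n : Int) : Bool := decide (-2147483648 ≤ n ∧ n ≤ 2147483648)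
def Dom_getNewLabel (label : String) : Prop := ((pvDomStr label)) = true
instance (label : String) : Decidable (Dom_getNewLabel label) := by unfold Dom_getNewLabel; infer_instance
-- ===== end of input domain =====

-- B builds a 52-letter translation table once and translates in one call instead of
-- A's per-character loop with ord/chr and two range branches (objective: idiomatic).

-- ===== PORT A =====
-- literal transliteration: accumulate the output characters left to right,
-- shifting the code by 1 in the two letter ranges
def getNewLabel (label : String) : String :=
  String.ofList (label.toList.foldl (fun acc s =>
    let n := s.toNat                      -- ord(s)
    let n := if 65 ≤ n ∧ n ≤ 90 then n + 1
             else if 97 ≤ n ∧ n ≤ 122 then n + 1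
             else n
    acc ++ [Char.ofNat n]) [])            -- newlabel += chr(n)

-- ===== PORT B =====
-- the maketrans table: each ASCII letter maps to the character one code higher
def pvTable : List (Char × Char) :=
  "ABCDEFGHIJKLMNOPQRSTUVWXYZabcdefghijklmnopqrstuvwxyz".toList.map
    (fun c => (c, Char.ofNat (c.toNat + 1)))

-- str.translate: replace a char by its table entry, keep it if absent
def pvTranslate (c : Char) : Char := (pvTable.lookup c).getD c

def getNewLabel_alt (label : String) : String :=
  String.ofList (label.toList.map pvTranslate)

-- ===== PRECONDITION & SPEC =====
def Spec_getNewLabel (label : String) (out : String) : Prop := out = getNewLabel_alt label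
instance (label : String) (out : String) : Decidable (Spec_getNewLabel label out) := by unfold Spec_getNewLabel; infer_instance

-- ===== CLAIM (what is proved, stated in full; the proofs are below) =====
def Claim_equal_getNewLabel : Prop := ∀ (label : String), Dom_getNewLabel label → Spec_getNewLabel label (getNewLabel label)

-- ===== LEMMAS AND PROOFS =====
def pvShiftA (s : Char) : Char :=
  let n := s.toNat
  let n := if 65 ≤ n ∧ n ≤ 90 then n + 1
           else if 97 ≤ n ∧ n ≤ 122 then n + 1
           else n
  Char.ofNat n

set_option maxRecDepth 4096 in
theorem pvShiftA_eq_translate_fin :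
    ∀ n : Fin 127, pvShiftA (Char.ofNat n.val) = pvTranslate (Char.ofNat n.val) := by
  decide

theorem pvShiftA_eq_translate (c : Char) (h : pvDomChar c = true) :
    pvShiftA c = pvTranslate c := by
  have hv : c.toNat < 127 := by
    simp [pvDomChar] at h
    omega
  have := pvShiftA_eq_translate_fin ⟨c.toNat, hv⟩
  simpa [Char.ofNat_toNat] using this

theorem pvFoldl_shift (l : List Char) (h : l.all pvDomChar = true) :
    ∀ acc : List Char,
      l.foldl (fun acc s =>
        let n := s.toNat
        let n := if 65 ≤ n ∧ n ≤ 90 then n + 1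
                 else if 97 ≤ n ∧ n ≤ 122 then n + 1
                 else n
        acc ++ [Char.ofNat n]) acc = acc ++ l.map pvTranslate := by
  induction l with
  | nil => intro acc; simp
  | cons c l ih =>
    intro acc
    simp only [List.all_cons, Bool.and_eq_true] at h
    have hc : pvShiftA c = pvTranslate c := pvShiftA_eq_translate c h.1
    simp only [List.foldl_cons, List.map_cons, ih h.2, List.append_assoc]
    simp [pvShiftA] at hc
    simp [hc]

-- ===== VERDICT (by name: the statement is the Claim_ definition above) =====
theorem getNewLabel_spec : Claim_equal_getNewLabel := by
  intro label h
  unfold Spec_getNewLabel getNewLabel getNewLabel_alt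
  have := pvFoldl_shift label.toList (by simpa [pvDomStr, Dom_getNewLabel] using h) []
  simp [this]
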